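-- pv_equiv track=rewrite | github.com/rdisho20/ls-core | py119/practice_problems_2/study3_3.py | substring_frequency
-- ===== SOURCE A (Python) =====
-- def substring_frequency(string):
--     if len(string) < 2:
--         return {}
--
--     result = {}
--
--     for idx, char in enumerate(string):
--         if idx == len(string) - 1:
--             break
--
--         substring = string[idx:idx + 2]
--
--         if result.get(substring, 0):
--             result[substring] += 1
--             continue
--
--         result[substring] = 1
--
--     return result
-- ===== SOURCE B (Python) =====
-- def substring_frequency(string):
--     bigrams = [string[i:i + 2] for i in range(len(string) - 1)]
--     return {bg: bigrams.count(bg) for bg in dict.fromkeys(bigrams)}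
-- ===== Notes on version B (the rewrite author's own statement) =====
-- stated objective: alternative
-- what changed: B materialises the bigram list once and builds the result in one dict-comprehension over the first-occurrence-deduplicated bigrams using list.count, replacing A's stateful single pass that increments dict entries and exits via an explicit break.
import Mathlib
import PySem

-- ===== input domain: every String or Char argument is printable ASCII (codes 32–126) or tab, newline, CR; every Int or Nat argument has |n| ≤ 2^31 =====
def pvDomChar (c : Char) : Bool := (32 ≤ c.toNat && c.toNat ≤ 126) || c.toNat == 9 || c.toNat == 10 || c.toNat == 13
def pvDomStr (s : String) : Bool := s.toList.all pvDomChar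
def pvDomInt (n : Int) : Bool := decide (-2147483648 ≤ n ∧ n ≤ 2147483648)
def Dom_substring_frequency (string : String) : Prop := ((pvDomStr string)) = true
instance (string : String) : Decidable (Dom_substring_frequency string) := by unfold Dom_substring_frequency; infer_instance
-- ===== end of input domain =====

-- B replaces A's stateful dict-incrementing pass (with its break) by a bigram list,
-- first-occurrence dedup, and per-key list.count — an alternative decomposition, not faster.


-- ===== PORT A =====
def substring_frequency (string : String) : List (String × Int) :=
  let cs := string.toList
  if cs.length < 2 then []
  else
    ((PySem.List.enumerate cs 0).foldl
      (fun (st : Bool × PySem.Dict String Int) p =>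
        if st.1 then st
        else if p.1 == (cs.length : Int) - 1 then (true, st.2)
        else
          let sub := String.mk (PySem.List.slice cs (some p.1) (some (p.1 + 2)))
          if st.2.getD sub 0 ≠ 0 then (st.1, st.2.insert sub (st.2.getD sub 0 + 1))
          else (st.1, st.2.insert sub 1))
      (false, PySem.Dict.empty)).2.items

-- ===== PORT B =====
def substring_frequency_alt (string : String) : List (String × Int) :=
  let cs := string.toList
  let bigrams := (PySem.List.pyRange 0 ((cs.length : Int) - 1) 1).map
    (fun i => String.mk (PySem.List.slice cs (some i) (some (i + 2))))
  (PySem.List.dedup bigrams).map (fun b => (b, (bigrams.count b : Int)))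

-- ===== PRECONDITION & SPEC =====
def Spec_substring_frequency (string : String) (out : List (String × Int)) : Prop := out = substring_frequency_alt string
instance (string : String) (out : List (String × Int)) : Decidable (Spec_substring_frequency string out) := by unfold Spec_substring_frequency; infer_instance

-- ===== CLAIM (what is proved, stated in full; the proofs are below) =====
def Claim_equal_substring_frequency : Prop := ∀ (string : String), Dom_substring_frequency string → Spec_substring_frequency string (substring_frequency string)

-- ===== LEMMAS AND PROOFS =====

-- A's loop while the break has not fired and the break index is not met:
-- the flag stays false and each step is the plain counting insert.
lemma pv_loop_flag (sub : Int → String) (m : Int) (l : List Int)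
    (d : PySem.Dict String Int) (h : ∀ i ∈ l, i ≠ m) :
    l.foldl
      (fun (st : Bool × PySem.Dict String Int) i =>
        if st.1 then st
        else if i == m then (true, st.2)
        else
          if st.2.getD (sub i) 0 ≠ 0 then (st.1, st.2.insert (sub i) (st.2.getD (sub i) 0 + 1))
          else (st.1, st.2.insert (sub i) 1))
      (false, d)
    = (false, l.foldl (fun d i => d.insert (sub i) (d.getD (sub i) 0 + 1)) d) := by
  induction l generalizing d with
  | nil => rfl
  | cons a t ih =>
    have ha : a ≠ m := h a (by simp)
    simp only [List.foldl_cons, if_neg (by simp [ha] : ¬ ((a == m) = true))]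
    simp only [Bool.false_eq_true, if_false]
    by_cases hz : d.getD (sub a) 0 ≠ 0
    · rw [if_pos hz]; exact ih _ (fun i hi => h i (List.mem_cons_of_mem _ hi))
    · rw [if_neg hz]
      have : d.insert (sub a) 1 = d.insert (sub a) (d.getD (sub a) 0 + 1) := by
        rw [not_ne_iff] at hz; rw [hz]; norm_num
      rw [this]
      exact ih _ (fun i hi => h i (List.mem_cons_of_mem _ hi))

theorem substring_frequency_spec : Claim_equal_substring_frequency := by
  intro string _
  unfold Spec_substring_frequency substring_frequency substring_frequency_alt
  set cs := string.toList with hcs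
  by_cases hlen : cs.length < 2
  · -- both sides are empty
    simp only [if_pos hlen]
    have : PySem.List.pyRange 0 ((cs.length : Int) - 1) 1 = [] := by
      apply PySem.List.pyRange_one_eq_nil; omega
    simp [this]
  · simp only [if_neg hlen]
    have h2 : 2 ≤ cs.length := by omega
    -- A's loop body only reads the index component p.1 of each enumerate pair
    rw [show
        ((PySem.List.enumerate cs 0).foldl
          (fun (st : Bool × PySem.Dict String Int) p =>
            if st.1 then st
            else if p.1 == (cs.length : Int) - 1 then (true, st.2)
            else
              let sub := String.mk (PySem.List.slice cs (some p.1) (some (p.1 + 2)))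
              if st.2.getD sub 0 ≠ 0 then (st.1, st.2.insert sub (st.2.getD sub 0 + 1))
              else (st.1, st.2.insert sub 1))
          (false, PySem.Dict.empty))
        = (((PySem.List.enumerate cs 0).map (·.1)).foldl
          (fun (st : Bool × PySem.Dict String Int) i =>
            if st.1 then st
            else if i == (cs.length : Int) - 1 then (true, st.2)
            else
              let sub := String.mk (PySem.List.slice cs (some i) (some (i + 2)))
              if st.2.getD sub 0 ≠ 0 then (st.1, st.2.insert sub (st.2.getD sub 0 + 1))
              else (st.1, st.2.insert sub 1))
          (false, PySem.Dict.empty))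
      from by rw [List.foldl_map]]
    rw [PySem.List.map_fst_enumerate]
    have hsucc : (0 : Int) + cs.length = ((cs.length : Int) - 1) + 1 := by omega
    rw [hsucc, PySem.List.pyRange_one_succ_right (by omega), List.foldl_append,
        pv_loop_flag _ _ _ _ (fun i hi => by
          rw [PySem.List.mem_pyRange_one] at hi; omega)]
    simp only [List.foldl_cons, List.foldl_nil, Bool.false_eq_true, if_false, BEq.rfl, if_true]
    rw [← List.foldl_map
        (f := fun i => String.mk (PySem.List.slice cs (some i) (some (i + 2))))
        (g := fun (d : PySem.Dict String Int) x => d.insert x (d.getD x 0 + 1)),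
      PySem.Dict.foldl_insert_getD_add_one_eq_counter, PySem.Dict.items_counter]
    simp [PySem.List.dedup_eq_ofList]
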